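-- pv_equiv track=rewrite | github.com/Bangi10/Trivia---Advanced-Programming | client_hw16.py | get_code_name
-- ===== SOURCE A (Python) =====
-- REQUESTS = {"LOGIN":200, "SIGNUP":201, "LOGOUT":202}
--
-- RESPONSES = {"ERRORS": {"REQUEST_ISNT_RELEVANT":50},
--              "LOGOUT": {"SUCCESS":90},
--              "LOGIN":{
--                       "SUCCESS":100,
--                       "NAME_NOT_EXISTS":101,
--                       "PASSWORD_MISMATCH":102,
--                       "USER_ALREADY_LOGINED":103
--                       },
--              "SIGNUP":{
--                       "SUCCESS":110,
--                       "NAME_ALREADY_EXISTS":111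
--                       }
--             }
--
-- def get_code_name(code: int):
--     for request_tuple in REQUESTS.items():
--         if request_tuple[1] == code:
--             return f"REQUESTS :: {request_tuple[0]}"
--     for response_type_tuple in RESPONSES.items():
--         for response_tuple in response_type_tuple[1].items():
--             if response_tuple[1] == code:
--                 return f"RESPONSES :: {response_type_tuple[0]} :: {response_tuple[0]}"
--     return "CODE DOESN'T EXIST"
-- ===== SOURCE B (Python) =====
-- REQUESTS = {"LOGIN":200, "SIGNUP":201, "LOGOUT":202}
--
-- RESPONSES = {"ERRORS": {"REQUEST_ISNT_RELEVANT":50},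
--              "LOGOUT": {"SUCCESS":90},
--              "LOGIN":{
--                       "SUCCESS":100,
--                       "NAME_NOT_EXISTS":101,
--                       "PASSWORD_MISMATCH":102,
--                       "USER_ALREADY_LOGINED":103
--                       },
--              "SIGNUP":{
--                       "SUCCESS":110,
--                       "NAME_ALREADY_EXISTS":111
--                       }
--             }
--
-- # Reverse-lookup table built once: code -> formatted name (REQUESTS first).
-- _CODE_NAMES = {}
-- for _k, _v in REQUESTS.items():
--     _CODE_NAMES.setdefault(_v, f"REQUESTS :: {_k}")
-- for _t, _d in RESPONSES.items():
--     for _k, _v in _d.items():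
--         _CODE_NAMES.setdefault(_v, f"RESPONSES :: {_t} :: {_k}")
--
-- def get_code_name(code: int):
--     return _CODE_NAMES.get(code, "CODE DOESN'T EXIST")
-- ===== Notes on version B (the rewrite author's own statement) =====
-- stated objective: simpler
-- what changed: B builds a reverse-lookup dict (code -> formatted name, REQUESTS entries inserted first) once at module load, so get_code_name is a single dict.get with a default instead of A's nested linear scans over both tables.
import Mathlib
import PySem

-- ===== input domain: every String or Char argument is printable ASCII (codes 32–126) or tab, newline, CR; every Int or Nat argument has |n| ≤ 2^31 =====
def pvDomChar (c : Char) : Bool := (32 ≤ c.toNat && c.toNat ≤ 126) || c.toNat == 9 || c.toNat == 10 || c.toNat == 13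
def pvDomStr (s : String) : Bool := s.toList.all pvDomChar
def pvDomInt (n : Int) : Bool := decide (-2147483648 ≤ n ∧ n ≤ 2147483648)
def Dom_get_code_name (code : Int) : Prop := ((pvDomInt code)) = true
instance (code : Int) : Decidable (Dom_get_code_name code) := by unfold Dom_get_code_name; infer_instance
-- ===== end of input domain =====

-- B replaces A's nested linear scans with a reverse-lookup table built once plus a single default lookup (simpler per-call code).


-- ===== PORT A =====
-- module constants (dicts as insertion-ordered association lists)
def pvREQUESTS : List (String × Int) := [("LOGIN", 200), ("SIGNUP", 201), ("LOGOUT", 202)]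
def pvRESPONSES : List (String × List (String × Int)) :=
  [("ERRORS", [("REQUEST_ISNT_RELEVANT", 50)]),
   ("LOGOUT", [("SUCCESS", 90)]),
   ("LOGIN", [("SUCCESS", 100), ("NAME_NOT_EXISTS", 101), ("PASSWORD_MISMATCH", 102), ("USER_ALREADY_LOGINED", 103)]),
   ("SIGNUP", [("SUCCESS", 110), ("NAME_ALREADY_EXISTS", 111)])]

-- the first for-loop of A
def pvScanRequests (code : Int) : List (String × Int) → Option String
  | [] => none
  | t :: rest => if t.2 == code then some ("REQUESTS :: " ++ t.1) else pvScanRequests code rest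

-- the inner for-loop of A
def pvScanInner (code : Int) (ty : String) : List (String × Int) → Option String
  | [] => none
  | t :: rest => if t.2 == code then some ("RESPONSES :: " ++ ty ++ " :: " ++ t.1) else pvScanInner code ty rest

-- the outer for-loop of A
def pvScanResponses (code : Int) : List (String × List (String × Int)) → Option String
  | [] => none
  | t :: rest =>
      match pvScanInner code t.1 t.2 with
      | some s => some s
      | none => pvScanResponses code rest

def get_code_name (code : Int) : String :=
  match pvScanRequests code pvREQUESTS with
  | some s => s
  | none =>
      match pvScanResponses code pvRESPONSES with
      | some s => s
      | none => "CODE DOESN'T EXIST"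

-- ===== PORT B =====
-- the one-time table build: REQUESTS entries first, then each RESPONSES sub-dict (setdefault = keep first)
def pvCodeNames : PySem.Dict Int String :=
  (pvRESPONSES.foldl (fun d t =>
      t.2.foldl (fun d' p => PySem.Dict.setdefault d' p.2 ("RESPONSES :: " ++ t.1 ++ " :: " ++ p.1)) d)
    (pvREQUESTS.foldl (fun d p => PySem.Dict.setdefault d p.2 ("REQUESTS :: " ++ p.1)) (PySem.Dict.empty)))

def get_code_name_alt (code : Int) : String :=
  PySem.Dict.getD pvCodeNames code "CODE DOESN'T EXIST"

-- ===== PRECONDITION & SPEC =====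
def Spec_get_code_name (code : Int) (out : String) : Prop := out = get_code_name_alt code
instance (code : Int) (out : String) : Decidable (Spec_get_code_name code out) := by unfold Spec_get_code_name; infer_instance

-- ===== CLAIM (what is proved, stated in full; the proofs are below) =====
def Claim_equal_get_code_name : Prop := ∀ (code : Int), Dom_get_code_name code → Spec_get_code_name code (get_code_name code)

-- ===== LEMMAS AND PROOFS =====

-- ===== VERDICT (by name: the statement is the Claim_ definition above) =====
theorem get_code_name_spec : Claim_equal_get_code_name := by
  intro code _
  unfold Spec_get_code_name
  by_cases h200 : code = 200; · subst h200; decide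
  by_cases h201 : code = 201; · subst h201; decide
  by_cases h202 : code = 202; · subst h202; decide
  by_cases h50 : code = 50; · subst h50; decide
  by_cases h90 : code = 90; · subst h90; decide
  by_cases h100 : code = 100; · subst h100; decide
  by_cases h101 : code = 101; · subst h101; decide
  by_cases h102 : code = 102; · subst h102; decide
  by_cases h103 : code = 103; · subst h103; decide
  by_cases h110 : code = 110; · subst h110; decide
  by_cases h111 : code = 111; · subst h111; decide
  simp [get_code_name, get_code_name_alt, pvScanRequests, pvScanInner, pvScanResponses,
        pvREQUESTS, pvRESPONSES, pvCodeNames,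
        PySem.Dict.getD, PySem.Dict.setdefault, PySem.Dict.empty, PySem.Dict.get?, PySem.Dict.insert,
        h200, h201, h202, h50, h90, h100, h101, h102, h103, h110,
        Ne.symm h200, Ne.symm h201, Ne.symm h202, Ne.symm h50, Ne.symm h90, Ne.symm h100,
        Ne.symm h101, Ne.symm h102, Ne.symm h103, Ne.symm h110, Ne.symm h111]
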